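-- pv_equiv track=rewrite | github.com/peacefulseeker/platform-dependencies | 127/ordinal.py | get_ordinal_suffix
-- ===== SOURCE A (Python) =====
-- def get_ordinal_suffix(number:int) -> str:
--     """Receives a number int and returns it appended with its ordinal suffix,
--        so 1 -> 1st, 2 -> 2nd, 4 -> 4th, 11 -> 11th, etc.
--
--        Rules:
--        https://en.wikipedia.org/wiki/Ordinal_indicator#English
--        - st is used with numbers ending in 1 (e.g. 1st, pronounced first)
--        - nd is used with numbers ending in 2 (e.g. 92nd, pronounced ninety-second)
--        - rd is used with numbers ending in 3 (e.g. 33rd, pronounced thirty-third)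
--        - As an exception to the above rules, all the "teen" numbers ending with
--          11, 12 or 13 use -th (e.g. 11th, pronounced eleventh, 112th,
--          pronounced one hundred [and] twelfth)
--        - th is used for all other numbers (e.g. 9th, pronounced ninth).
--        """
--     str_num = str(number)
--
--     if any(str_num.endswith(teen_num) for teen_num in ['11', '12', '13']):
--         return str_num + 'th'
--     elif str_num.endswith('1'):
--         return str_num + 'st'
--     elif str_num.endswith('2'):
--         return str_num + 'nd'
--     elif str_num.endswith('3'):
--         return str_num + 'rd'
--
--     return str_num + 'th'
-- ===== SOURCE B (Python) =====
-- # Table-driven: a 100-entry suffix table indexed by the last two digits,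
-- # built once at module load; the function is a single table lookup.
-- _SUFFIXES = ['th'] * 100
-- for _s, _d in (('st', 1), ('nd', 2), ('rd', 3)):
--     for _i in range(_d, 100, 10):
--         _SUFFIXES[_i] = _s
-- for _i in (11, 12, 13):
--     _SUFFIXES[_i] = 'th'
--
--
-- def get_ordinal_suffix(number: int) -> str:
--     return str(number) + _SUFFIXES[abs(number) % 100]
-- ===== Notes on version B (the rewrite author's own statement) =====
-- stated objective: alternative
-- what changed: Replaced A's branch chain of endswith string tests with a 100-entry suffix table precomputed once from the ordinal rules and indexed by abs(number) % 100, so the function itself is branch-free: one modulo and one list lookup.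
import Mathlib
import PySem

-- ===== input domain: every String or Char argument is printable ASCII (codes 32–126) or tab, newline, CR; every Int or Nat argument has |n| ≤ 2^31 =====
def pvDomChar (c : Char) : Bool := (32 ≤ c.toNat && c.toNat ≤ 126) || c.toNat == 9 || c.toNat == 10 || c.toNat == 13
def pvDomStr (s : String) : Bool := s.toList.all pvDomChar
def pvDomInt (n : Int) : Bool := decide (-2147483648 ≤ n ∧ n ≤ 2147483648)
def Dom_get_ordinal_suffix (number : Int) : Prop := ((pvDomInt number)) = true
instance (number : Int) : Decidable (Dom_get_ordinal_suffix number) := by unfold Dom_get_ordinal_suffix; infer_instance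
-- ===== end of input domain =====

-- B replaces A's endswith branch chain by a 100-entry suffix table built once and indexed by abs(number) % 100 (alternative; same cost).

-- ===== PORT A =====
def get_ordinal_suffix (number : Int) : String :=
  let str_num := PySem.Int.toStr number
  if (["11", "12", "13"].any (fun teen_num => PySem.Str.endswith str_num teen_num)) then
    str_num ++ "th"
  else if PySem.Str.endswith str_num "1" then
    str_num ++ "st"
  else if PySem.Str.endswith str_num "2" then
    str_num ++ "nd"
  else if PySem.Str.endswith str_num "3" then
    str_num ++ "rd"
  else
    str_num ++ "th"

-- ===== PORT B =====
-- The module-level table `_SUFFIXES` of Source B, built by the same loops.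
def pvSuffixTable : List String :=
  let t0 := List.replicate 100 "th"
  let t1 := [("st", (1 : Int)), ("nd", 2), ("rd", 3)].foldl
    (fun t sd => (PySem.List.pyRange sd.2 100 10).foldl (fun t i => t.set i.toNat sd.1) t) t0
  [11, 12, 13].foldl (fun t i => t.set i "th") t1

def get_ordinal_suffix_alt (number : Int) : String :=
  -- `_SUFFIXES[abs(number) % 100]`: the index is always in [0, 100), so pyGet? is never none
  PySem.Int.toStr number ++ (PySem.List.pyGet? pvSuffixTable (PySem.Int.mod |number| 100)).getD ""

-- ===== PRECONDITION & SPEC =====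
def Spec_get_ordinal_suffix (number : Int) (out : String) : Prop := out = get_ordinal_suffix_alt number
instance (number : Int) (out : String) : Decidable (Spec_get_ordinal_suffix number out) := by unfold Spec_get_ordinal_suffix; infer_instance

-- ===== CLAIM (what is proved, stated in full; the proofs are below) =====
def Claim_equal_get_ordinal_suffix : Prop := ∀ (number : Int), Dom_get_ordinal_suffix number → Spec_get_ordinal_suffix number (get_ordinal_suffix number)

-- ===== LEMMAS AND PROOFS =====

/-- The English ordinal-suffix rule for a residue mod 100, as a plain function. -/
def pvSuffixOf (m : Nat) : String :=
  if 11 ≤ m ∧ m ≤ 13 then "th"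
  else if m % 10 = 1 then "st"
  else if m % 10 = 2 then "nd"
  else if m % 10 = 3 then "rd"
  else "th"

set_option maxRecDepth 4000 in
theorem pvTable_eq : ∀ m ∈ List.range 100,
    (PySem.List.pyGet? pvSuffixTable (m : Int)).getD "" = pvSuffixOf m := by decide

/-- Decimal digit characters of `n` (most significant first), the list `Nat.toDigits 10` builds. -/
def pvDChars (n : Nat) : List Char :=
  if _h : n < 10 then [Nat.digitChar n]
  else pvDChars (n / 10) ++ [Nat.digitChar (n % 10)]
decreasing_by exact Nat.div_lt_self (by omega) (by omega)

theorem pvToDigitsCore_eq (f : Nat) : ∀ (n : Nat) (ds : List Char), n < f →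
    Nat.toDigitsCore 10 f n ds = pvDChars n ++ ds := by
  induction f with
  | zero => intro n ds h; omega
  | succ f ih =>
    intro n ds h
    rw [Nat.toDigitsCore]
    by_cases h10 : n < 10
    · have : n / 10 = 0 := Nat.div_eq_of_lt h10
      simp [this, pvDChars, h10, Nat.mod_eq_of_lt h10]
    · have hne : ¬ n / 10 = 0 := by omega
      simp only [hne, if_false]
      rw [ih (n / 10) _ (by omega)]
      conv_rhs => rw [pvDChars]
      simp [h10]

theorem pvToDigits_eq (n : Nat) : Nat.toDigits 10 n = pvDChars n :=
  (pvToDigitsCore_eq (n + 1) n [] (by omega)).trans (by simp)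

/-- `toChars n` is a (possibly empty) prefix followed by the digit chars of `n.natAbs`. -/
theorem pvToChars_eq (n : Int) :
    PySem.Int.toChars n = (if n < 0 then ['-'] else []) ++ pvDChars n.natAbs := by
  unfold PySem.Int.toChars
  by_cases h : n < 0
  · simp [h, pvToDigits_eq]
  · have : n.toNat = n.natAbs := by omega
    simp [h, this, pvToDigits_eq]

theorem pvSuffix_one {c d : Char} {t : List Char} : [c] <:+ t ++ [d] ↔ c = d := by
  rw [← List.reverse_prefix]
  simp

theorem pvSuffix_two {c1 c2 d1 d2 : Char} {t : List Char} :
    [c1, c2] <:+ t ++ [d1, d2] ↔ c1 = d1 ∧ c2 = d2 := by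
  rw [← List.reverse_prefix]
  constructor
  · intro h
    rcases h with ⟨u, hu⟩
    simp at hu
    exact ⟨hu.2.1, hu.1⟩
  · rintro ⟨rfl, rfl⟩
    simp

theorem pvDChars_last (m : Nat) : ∃ t, pvDChars m = t ++ [Nat.digitChar (m % 10)] := by
  rw [pvDChars]
  by_cases h : m < 10
  · exact ⟨[], by simp [h, Nat.mod_eq_of_lt h]⟩
  · exact ⟨pvDChars (m / 10), by simp [h]⟩

theorem pvDChars_last_two (m : Nat) (h : 10 ≤ m) :
    ∃ t, pvDChars m = t ++ [Nat.digitChar (m / 10 % 10), Nat.digitChar (m % 10)] := by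
  rw [pvDChars]
  have h' : ¬ m < 10 := by omega
  obtain ⟨t, ht⟩ := pvDChars_last (m / 10)
  exact ⟨t, by simp [h', ht]⟩

theorem pvDigitChar_inj {k j : Nat} (hk : k < 10) (hj : j < 10) :
    Nat.digitChar k = Nat.digitChar j ↔ k = j := by
  interval_cases k <;> interval_cases j <;> decide

/-- A's single-digit endswith test, numerically. -/
theorem pvEnds_one (n : Int) (j : Nat) (hj : j < 10) :
    (PySem.Chars.endswith (PySem.Int.toChars n) [Nat.digitChar j] = true) ↔ n.natAbs % 10 = j := by
  rw [PySem.Chars.endswith_iff, pvToChars_eq]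
  obtain ⟨t, ht⟩ := pvDChars_last n.natAbs
  rw [ht, ← List.append_assoc, pvSuffix_one]
  rw [pvDigitChar_inj hj (Nat.mod_lt _ (by omega))]
  exact eq_comm

/-- A's two-digit endswith test, numerically (first digit nonzero). -/
theorem pvEnds_two (n : Int) (j1 j2 : Nat) (hj1 : 0 < j1) (hj1' : j1 < 10) (hj2 : j2 < 10) :
    (PySem.Chars.endswith (PySem.Int.toChars n) [Nat.digitChar j1, Nat.digitChar j2] = true) ↔
      n.natAbs % 100 = 10 * j1 + j2 := by
  rw [PySem.Chars.endswith_iff, pvToChars_eq]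
  by_cases h10 : 10 ≤ n.natAbs
  · obtain ⟨t, ht⟩ := pvDChars_last_two n.natAbs h10
    rw [ht, ← List.append_assoc, pvSuffix_two]
    rw [pvDigitChar_inj hj1' (Nat.mod_lt _ (by omega)),
        pvDigitChar_inj hj2 (Nat.mod_lt _ (by omega))]
    omega
  · -- fewer than two digits: the test is false, and so is the modulus condition
    have hm : n.natAbs < 10 := by omega
    rw [pvDChars, dif_pos hm]
    constructor
    · intro h
      by_cases hneg : n < 0
      · simp only [hneg, if_true] at h
        rw [show (['-'] ++ [Nat.digitChar n.natAbs] : List Char)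
              = [] ++ ['-', Nat.digitChar n.natAbs] from rfl, pvSuffix_two] at h
        interval_cases j1 <;> exact absurd h.1 (by decide)
      · simp only [hneg, if_false, List.nil_append] at h
        have := h.length_le
        simp at this
    · intro h; omega

theorem pvEnds_one' (n : Int) (s : String) (j : Nat) (hj : j < 10)
    (hs : s.toList = [Nat.digitChar j]) :
    (PySem.Str.endswith (PySem.Int.toStr n) s = true) ↔ n.natAbs % 10 = j := by
  rw [PySem.Str.endswith_eq, PySem.Int.toList_toStr, hs]
  exact pvEnds_one n j hj

theorem pvEnds_two' (n : Int) (s : String) (j1 j2 : Nat) (hj1 : 0 < j1) (hj1' : j1 < 10)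
    (hj2 : j2 < 10) (hs : s.toList = [Nat.digitChar j1, Nat.digitChar j2]) :
    (PySem.Str.endswith (PySem.Int.toStr n) s = true) ↔ n.natAbs % 100 = 10 * j1 + j2 := by
  rw [PySem.Str.endswith_eq, PySem.Int.toList_toStr, hs]
  exact pvEnds_two n j1 j2 hj1 hj1' hj2

theorem pvModAbs (n : Int) (k : Nat) : PySem.Int.mod |n| (k : Int) = ((n.natAbs % k : Nat) : Int) := by
  rw [Int.abs_eq_natAbs]
  exact_mod_cast PySem.Int.mod_natCast n.natAbs k

/-- A's branch chain computes exactly `pvSuffixOf (n.natAbs % 100)`. -/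
theorem pvA_eq (n : Int) :
    get_ordinal_suffix n = PySem.Int.toStr n ++ pvSuffixOf (n.natAbs % 100) := by
  unfold get_ordinal_suffix pvSuffixOf
  rw [show n.natAbs % 100 % 10 = n.natAbs % 10 from Nat.mod_mod_of_dvd _ (by omega)]
  have e11 := pvEnds_two' n "11" 1 1 (by omega) (by omega) (by omega) (by decide)
  have e12 := pvEnds_two' n "12" 1 2 (by omega) (by omega) (by omega) (by decide)
  have e13 := pvEnds_two' n "13" 1 3 (by omega) (by omega) (by omega) (by decide)
  have e1 := pvEnds_one' n "1" 1 (by omega) (by decide)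
  have e2 := pvEnds_one' n "2" 2 (by omega) (by decide)
  have e3 := pvEnds_one' n "3" 3 (by omega) (by decide)
  by_cases hteen : n.natAbs % 100 = 11 ∨ n.natAbs % 100 = 12 ∨ n.natAbs % 100 = 13
  · have hA : (["11", "12", "13"].any
        (fun teen_num => PySem.Str.endswith (PySem.Int.toStr n) teen_num)) = true := by
      simp only [List.any_cons, List.any_nil, Bool.or_eq_true, Bool.or_false]
      rcases hteen with h | h | h
      · exact Or.inl (e11.mpr (by omega))
      · exact Or.inr (Or.inl (e12.mpr (by omega)))
      · exact Or.inr (Or.inr (e13.mpr (by omega)))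
    rw [if_pos hA, if_pos (show 11 ≤ n.natAbs % 100 ∧ n.natAbs % 100 ≤ 13 by omega)]
  · have hA : ¬ (["11", "12", "13"].any
        (fun teen_num => PySem.Str.endswith (PySem.Int.toStr n) teen_num)) = true := by
      simp only [List.any_cons, List.any_nil, Bool.or_eq_true, Bool.or_false]
      rintro (h | h | h)
      · exact hteen (Or.inl (by have := e11.mp h; omega))
      · exact hteen (Or.inr (Or.inl (by have := e12.mp h; omega)))
      · exact hteen (Or.inr (Or.inr (by have := e13.mp h; omega)))
    rw [if_neg hA, if_neg (show ¬ (11 ≤ n.natAbs % 100 ∧ n.natAbs % 100 ≤ 13) by omega)]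
    have b1 : PySem.Str.endswith (PySem.Int.toStr n) "1" = decide (n.natAbs % 10 = 1) := by
      by_cases h : n.natAbs % 10 = 1
      · rw [e1.mpr h, h]; exact (decide_eq_true rfl).symm
      · simp only [h, decide_false]
        exact Bool.eq_false_iff.mpr (fun hc => h (e1.mp hc))
    have b2 : PySem.Str.endswith (PySem.Int.toStr n) "2" = decide (n.natAbs % 10 = 2) := by
      by_cases h : n.natAbs % 10 = 2
      · rw [e2.mpr h, h]; exact (decide_eq_true rfl).symm
      · simp only [h, decide_false]
        exact Bool.eq_false_iff.mpr (fun hc => h (e2.mp hc))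
    have b3 : PySem.Str.endswith (PySem.Int.toStr n) "3" = decide (n.natAbs % 10 = 3) := by
      by_cases h : n.natAbs % 10 = 3
      · rw [e3.mpr h, h]; exact (decide_eq_true rfl).symm
      · simp only [h, decide_false]
        exact Bool.eq_false_iff.mpr (fun hc => h (e3.mp hc))
    rw [b1, b2, b3]
    by_cases h1 : n.natAbs % 10 = 1 <;> by_cases h2 : n.natAbs % 10 = 2 <;>
      by_cases h3 : n.natAbs % 10 = 3 <;> simp [h1, h2, h3]

-- ===== VERDICT (by name: the statement is the Claim_ definition above) =====
theorem get_ordinal_suffix_spec : Claim_equal_get_ordinal_suffix := by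
  intro n _
  unfold Spec_get_ordinal_suffix get_ordinal_suffix_alt
  rw [show PySem.Int.mod |n| 100 = ((n.natAbs % 100 : Nat) : Int) from by
        exact_mod_cast pvModAbs n 100, pvA_eq n,
      pvTable_eq (n.natAbs % 100) (List.mem_range.mpr (Nat.mod_lt _ (by omega)))]
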